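-- pv_equiv track=rewrite | github.com/jasonlee27/alict | python/hs/testsuite/Search.py | _get_pospattern_to_wordproduct
-- ===== SOURCE A (Python) =====
-- from itertools import product
--
-- def _get_pospattern_to_wordproduct(pos_pattern, value_dict):
--     results = list()
--     pos_dict = {
--         p: value_dict[p]
--         for p in pos_pattern.split('_')
--     }
--     word_product = [dict(zip(pos_dict, v)) for v in product(*pos_dict.values())]
--     for wp in word_product:
--         results.append(" ".join(list(wp.values())))
--     # end for
--     return results
-- ===== SOURCE B (Python) =====
-- def _get_pospattern_to_wordproduct(pos_pattern, value_dict):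
--     # Mixed-radix index decoding: enumerate combination number i in range(total)
--     # and decode its digits arithmetically, instead of itertools.product + dicts.
--     tags = list(dict.fromkeys(pos_pattern.split('_')))
--     word_lists = [value_dict[t] for t in tags]
--     total = 1
--     for ws in word_lists:
--         total *= len(ws)
--     results = []
--     for i in range(total):
--         parts = []
--         for ws in reversed(word_lists):
--             i, r = divmod(i, len(ws))
--             parts.append(ws[r])
--         results.append(" ".join(reversed(parts)))
--     return results
-- ===== Notes on version B (the rewrite author's own statement) =====
-- stated objective: alternative
-- what changed: B replaces the dict-comprehension + itertools.product + dict(zip(...)) pipeline by ranked enumeration: it counts the total number of combinations and decodes each rank i in range(total) into its words by mixed-radix divmod arithmetic.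
import Mathlib
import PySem

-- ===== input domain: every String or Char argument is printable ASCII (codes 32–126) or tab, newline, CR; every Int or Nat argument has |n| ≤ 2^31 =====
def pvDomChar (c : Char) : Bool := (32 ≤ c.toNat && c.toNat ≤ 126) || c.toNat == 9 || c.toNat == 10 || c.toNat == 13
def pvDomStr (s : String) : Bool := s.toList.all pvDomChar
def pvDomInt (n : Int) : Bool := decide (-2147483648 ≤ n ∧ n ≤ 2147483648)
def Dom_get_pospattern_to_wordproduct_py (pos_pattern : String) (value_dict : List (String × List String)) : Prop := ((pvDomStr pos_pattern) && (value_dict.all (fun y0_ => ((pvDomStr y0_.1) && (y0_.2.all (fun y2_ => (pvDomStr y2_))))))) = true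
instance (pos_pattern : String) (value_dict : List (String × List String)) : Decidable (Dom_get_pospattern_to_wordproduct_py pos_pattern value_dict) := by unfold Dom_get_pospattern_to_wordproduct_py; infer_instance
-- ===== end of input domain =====

-- B enumerates combination ranks 0..total-1 and decodes each rank into words by
-- mixed-radix divmod arithmetic, instead of itertools.product + intermediate dicts.

-- ===== PORT A =====
-- value_dict[p]: Python raises KeyError on a missing key; Pre_ excludes that, so `.getD []` is never reached on admitted inputs.
def pvLookup (value_dict : List (String × List String)) (p : String) : List String :=
  ((PySem.Dict.ofList value_dict).get? p).getD []

-- itertools.product over a list of word lists (leftmost factor slowest), exact.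
def pvProdA : List (List String) → List (List String)
  | [] => [[]]
  | l :: ls => l.flatMap (fun x => (pvProdA ls).map (fun v => x :: v))

def get_pospattern_to_wordproduct_py (pos_pattern : String) (value_dict : List (String × List String)) : List String :=
  -- pos_pattern.split('_'); the separator "_" is non-empty, so split? is always `some`
  let tags := (PySem.Str.split? pos_pattern "_").getD []
  -- pos_dict = {p: value_dict[p] for p in tags}
  let pos_dict : PySem.Dict String (List String) :=
    tags.foldl (fun d p => d.insert p (pvLookup value_dict p)) PySem.Dict.empty
  -- word_product = [dict(zip(pos_dict, v)) for v in product(*pos_dict.values())]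
  let word_product := (pvProdA pos_dict.values).map (fun v => PySem.Dict.ofList (pos_dict.keys.zip v))
  -- for wp in word_product: results.append(" ".join(list(wp.values())))
  word_product.foldl (fun results wp => results ++ [PySem.Str.join " " wp.values]) []

-- ===== PORT B =====
-- ws[r] from Source B; whenever the loop runs, r = i % len(ws) with len(ws) > 0, so the
-- index is in range and `.getD ""` is never reached.
def pvIdx (ws : List String) (r : Nat) : String :=
  (PySem.List.pyGet? ws (r : Int)).getD ""

def get_pospattern_to_wordproduct_py_alt (pos_pattern : String) (value_dict : List (String × List String)) : List String :=
  -- tags = list(dict.fromkeys(pos_pattern.split('_')))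
  let tags := PySem.List.dedup ((PySem.Str.split? pos_pattern "_").getD [])
  -- word_lists = [value_dict[t] for t in tags]
  let word_lists := tags.map (pvLookup value_dict)
  -- total = 1; for ws in word_lists: total *= len(ws)
  let total := word_lists.foldl (fun t ws => t * ws.length) 1
  -- for i in range(total): decode rank i by divmod over reversed(word_lists)
  (List.range total).map (fun i =>
    let st := word_lists.reverse.foldl
      (fun st ws => (st.1 / ws.length, st.2 ++ [pvIdx ws (st.1 % ws.length)])) (i, ([] : List String))
    PySem.Str.join " " st.2.reverse)

-- ===== PRECONDITION & SPEC =====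
-- Pre_ excludes exactly the inputs where Python A raises KeyError: some tag of the split pattern is not a key of value_dict.
def Pre_get_pospattern_to_wordproduct_py (pos_pattern : String) (value_dict : List (String × List String)) : Prop :=
  ∀ t ∈ (PySem.Str.split? pos_pattern "_").getD [], (PySem.Dict.ofList value_dict).contains t = true
instance (pos_pattern : String) (value_dict : List (String × List String)) : Decidable (Pre_get_pospattern_to_wordproduct_py pos_pattern value_dict) := by unfold Pre_get_pospattern_to_wordproduct_py; infer_instance
def pvWitness_get_pospattern_to_wordproduct_py : String × (List (String × List String)) :=
  ("NN_VB", [("NN", ["dog", "cat"]), ("VB", ["runs"])])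
def Spec_get_pospattern_to_wordproduct_py (pos_pattern : String) (value_dict : List (String × List String)) (out : List String) : Prop := out = get_pospattern_to_wordproduct_py_alt pos_pattern value_dict
instance (pos_pattern : String) (value_dict : List (String × List String)) (out : List String) : Decidable (Spec_get_pospattern_to_wordproduct_py pos_pattern value_dict out) := by unfold Spec_get_pospattern_to_wordproduct_py; infer_instance

-- ===== CLAIM (what is proved, stated in full; the proofs are below) =====
def Claim_equal_get_pospattern_to_wordproduct_py : Prop := ∀ (pos_pattern : String) (value_dict : List (String × List String)), Dom_get_pospattern_to_wordproduct_py pos_pattern value_dict → Pre_get_pospattern_to_wordproduct_py pos_pattern value_dict → Spec_get_pospattern_to_wordproduct_py pos_pattern value_dict (get_pospattern_to_wordproduct_py pos_pattern value_dict)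

-- ===== LEMMAS AND PROOFS =====

-- the product of the factor lengths (what B's `total` loop computes)
def pvP (ls : List (List String)) : Nat := (ls.map List.length).prod

-- structural form of B's divmod loop, little-endian (first factor = fastest digit)
def pvDecR : List (List String) → Nat → List String
  | [], _ => []
  | w :: rest, i => pvIdx w (i % w.length) :: pvDecR rest (i / w.length)

lemma pvFoldl_mul : ∀ (ls : List (List String)) (t : Nat),
    ls.foldl (fun t ws => t * ws.length) t = t * pvP ls := by
  intro ls
  induction ls with
  | nil => intro t; simp [pvP]
  | cons w rest ih =>
    intro t
    rw [List.foldl_cons, ih]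
    simp [pvP, Nat.mul_assoc]

lemma pvFoldl_decR : ∀ (rs : List (List String)) (i : Nat) (acc : List String),
    (rs.foldl (fun st ws => (st.1 / ws.length, st.2 ++ [pvIdx ws (st.1 % ws.length)]))
      (i, acc)).2 = acc ++ pvDecR rs i := by
  intro rs
  induction rs with
  | nil => intro i acc; simp [pvDecR]
  | cons w rest ih =>
    intro i acc
    rw [List.foldl_cons, ih]
    simp [pvDecR]

lemma pvFlatMap_single (l : List String) (g : String → List String) :
    l.flatMap (fun x => [g x]) = l.map g := by
  induction l with
  | nil => rfl
  | cons x xs ih => simp only [List.flatMap_cons, List.map_cons, ih]; rfl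

lemma pvProdA_append : ∀ (ls : List (List String)) (w : List String),
    pvProdA (ls ++ [w]) = (pvProdA ls).flatMap (fun v => w.map (fun x => v ++ [x])) := by
  intro ls
  induction ls with
  | nil =>
    intro w
    simp only [List.nil_append, pvProdA]
    simpa using pvFlatMap_single w (fun x => [x])
  | cons l ls ih =>
    intro w
    simp only [List.cons_append, pvProdA, ih]
    simp [List.map_flatMap, List.flatMap_assoc, List.flatMap_map, List.map_map, Function.comp_def]

lemma pvRange_mul (a b : Nat) (f : Nat → List String) :
    (List.range (a * b)).map f
      = (List.range a).flatMap (fun q => (List.range b).map (fun r => f (q * b + r))) := by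
  induction a with
  | zero => simp
  | succ a ih =>
    have hab : (a + 1) * b = a * b + b := by ring
    rw [hab, List.range_add, List.map_append, ih, List.range_succ, List.flatMap_append]
    simp [List.map_map, Function.comp_def]

lemma pvIdx_eq (w : List String) (j : Nat) (h : j < w.length) : pvIdx w j = w[j] := by
  simp [pvIdx, PySem.List.pyGet?_natCast, List.getElem?_eq_getElem h]

lemma pvMap_range (w : List String) (g : String → List String) :
    w.map g = (List.range w.length).map (fun r => g (pvIdx w r)) := by
  apply List.ext_getElem
  · simp
  · intro j h1 h2
    have hj : j < w.length := by simpa using h1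
    simp [pvIdx_eq w j hj]

lemma pvP_cons (w : List String) (rs : List (List String)) :
    pvP (w :: rs) = w.length * pvP rs := by simp [pvP]

lemma pvProdA_reverse_eq : ∀ (rs : List (List String)),
    pvProdA rs.reverse = (List.range (pvP rs)).map (fun i => (pvDecR rs i).reverse) := by
  intro rs
  induction rs with
  | nil => simp [pvProdA, pvP, pvDecR]
  | cons w rest ih =>
    rw [List.reverse_cons, pvProdA_append, ih, pvP_cons, Nat.mul_comm,
      pvRange_mul (pvP rest) w.length]
    rw [List.flatMap_map]
    apply List.flatMap_congr
    intro q hq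
    rw [pvMap_range w (fun x => (pvDecR rest q).reverse ++ [x])]
    apply List.map_congr_left
    intro r hr
    have hrlt : r < w.length := List.mem_range.mp hr
    have h1 : (q * w.length + r) % w.length = r := by
      rw [Nat.add_comm, Nat.add_mul_mod_self_right]
      exact Nat.mod_eq_of_lt hrlt
    have h2 : (q * w.length + r) / w.length = q := by
      rw [Nat.add_comm, Nat.add_mul_div_right _ _ (show 0 < w.length by omega),
        Nat.div_eq_of_lt hrlt, Nat.zero_add]
    simp [pvDecR, h1, h2]

lemma pvP_reverse (ls : List (List String)) : pvP ls.reverse = pvP ls := by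
  simp [pvP]

lemma pvProdA_length : ∀ (ls : List (List String)) (v : List String), v ∈ pvProdA ls → v.length = ls.length := by
  intro ls
  induction ls with
  | nil => simp [pvProdA]
  | cons l ls ih =>
    intro v hv
    simp only [pvProdA, List.mem_flatMap, List.mem_map] at hv
    obtain ⟨x, _, w, hw, rfl⟩ := hv
    simp [ih w hw]

lemma pvGet?_foldl_insert_const (f : String → List String) (l : List String)
    (d : PySem.Dict String (List String)) (k : String) :
    (l.foldl (fun d p => d.insert p (f p)) d).get? k = if k ∈ l then some (f k) else d.get? k := by
  induction l generalizing d with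
  | nil => simp
  | cons a l ih =>
    rw [List.foldl_cons, ih]
    by_cases hk : k ∈ l
    · simp [hk]
    · rw [PySem.Dict.get?_insert]
      by_cases hka : k = a
      · simp [hka]
      · simp [hka, hk]

lemma pvPosDict_keys (f : String → List String) (tags : List String) :
    (tags.foldl (fun d p => d.insert p (f p)) PySem.Dict.empty).keys = PySem.List.dedup tags := by
  have h := PySem.Dict.keys_foldl_insert tags (fun _ p => f p) (PySem.Dict.empty (κ := String) (ν := List String))
  rw [PySem.List.dedup_eq_ofList, PySem.Set.ofList_eq_foldl]
  exact h.trans (by rw [PySem.Dict.keys_empty]; rfl)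

lemma pvPosDict_values (f : String → List String) (tags : List String) :
    (tags.foldl (fun d p => d.insert p (f p)) PySem.Dict.empty).values = (PySem.List.dedup tags).map f := by
  have hnd : (tags.foldl (fun d p => d.insert p (f p)) PySem.Dict.empty).keys.Nodup := by
    have := PySem.Dict.nodup_keys_foldl_insert tags (fun _ p => f p)
      (PySem.Dict.empty (κ := String) (ν := List String)) (by simp [PySem.Dict.keys_empty])
    exact this
  rw [PySem.Dict.values_eq_map_keys _ hnd [], pvPosDict_keys]
  apply List.map_congr_left
  intro k hk
  have hmem : k ∈ tags := by
    rw [PySem.List.mem_dedup] at hk; exact hk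
  rw [PySem.Dict.getD_eq_get?_getD, pvGet?_foldl_insert_const]
  simp [hmem]

lemma pvValues_ofList_zip (ks : List String) (v : List String)
    (hn : ks.Nodup) (hl : v.length = ks.length) :
    (PySem.Dict.ofList (ks.zip v)).values = v := by
  have hfst : (ks.zip v).map Prod.fst = ks := List.map_fst_zip (by omega)
  have hitems := PySem.Dict.items_foldl_insert_fresh (ks.zip v) Prod.fst Prod.snd
      (PySem.Dict.empty (κ := String) (ν := String))
      (by intro a _; simp [PySem.Dict.contains_empty])
      (by rw [hfst]; exact hn)
  have hemp : (PySem.Dict.empty (κ := String) (ν := String)).items = [] := rfl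
  have hof : (PySem.Dict.ofList (ks.zip v)).items = (ks.zip v).map (fun a => (a.1, a.2)) := by
    exact hitems.trans (by rw [hemp]; simp)
  show (PySem.Dict.ofList (ks.zip v)).items.map Prod.snd = v
  rw [hof]
  simp only [List.map_map]
  exact List.map_snd_zip (by omega)

-- ===== VERDICT (by name: the statement is the Claim_ definition above) =====
theorem get_pospattern_to_wordproduct_py_spec : Claim_equal_get_pospattern_to_wordproduct_py := by
  intro pos_pattern value_dict _dom _pre
  show get_pospattern_to_wordproduct_py pos_pattern value_dict
      = get_pospattern_to_wordproduct_py_alt pos_pattern value_dict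
  simp only [get_pospattern_to_wordproduct_py, get_pospattern_to_wordproduct_py_alt]
  rw [PySem.List.foldl_append_singleton_eq_map, pvPosDict_values, pvPosDict_keys,
    pvFoldl_mul, Nat.one_mul]
  set tags := PySem.List.dedup ((PySem.Str.split? pos_pattern "_").getD []) with htags
  set wl := tags.map (pvLookup value_dict) with hwl
  -- A's side: each zip-dict's values are exactly the product tuple
  have hA : (pvProdA wl).map (fun v => PySem.Str.join " " (PySem.Dict.ofList (tags.zip v)).values)
      = (pvProdA wl).map (PySem.Str.join " ") := by
    apply List.map_congr_left
    intro v hv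
    have hlen : v.length = tags.length := by
      have := pvProdA_length wl v hv
      simpa [hwl] using this
    rw [pvValues_ofList_zip _ _ (PySem.List.nodup_dedup _) hlen]
  simp only [List.nil_append, List.map_map, Function.comp_def]
  rw [hA]
  -- B's side: the divmod fold decodes rank i
  have hB : ∀ i : Nat,
      (wl.reverse.foldl (fun st ws => (st.1 / ws.length, st.2 ++ [pvIdx ws (st.1 % ws.length)]))
        (i, ([] : List String))).2 = pvDecR wl.reverse i := by
    intro i; rw [pvFoldl_decR]; simp
  have hprod : pvProdA wl = (List.range (pvP wl)).map (fun i => (pvDecR wl.reverse i).reverse) := by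
    have := pvProdA_reverse_eq wl.reverse
    rw [List.reverse_reverse, pvP_reverse] at this
    exact this
  have htot : wl.foldl (fun t ws => t * ws.length) 1 = pvP wl := by
    rw [pvFoldl_mul, Nat.one_mul]
  rw [hprod, List.map_map]
  apply List.map_congr_left
  intro i _
  simp only [hB]
  rfl
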